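-- pv_equiv track=rewrite | github.com/the-omega-institute/automath | theory/2026_golden_ratio_driven_scan_projection_generation_recursive_emergence/scripts/exp_fold_max_fiber_achievers_bsplit.py | zeckendorf_word
-- ===== SOURCE A (Python) =====
-- from typing import Dict, List, Tuple
--
-- def fib_upto(n: int) -> List[int]:
--     if n < 0:
--         raise ValueError("n must be >= 0")
--     F = [0, 1]
--     for _ in range(2, n + 1):
--         F.append(F[-1] + F[-2])
--     return F[: n + 1]
--
-- def zeckendorf_word(m: int, r: int) -> str:
--     """Unique x in X_m (no adjacent 11) with V_m(x)=r."""
--     if m < 1: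
--         raise ValueError("m must be >= 1")
--     F = fib_upto(m + 2)
--     if r < 0 or r >= F[m + 2]:
--         raise ValueError("r out of range for modulus F_{m+2}")
--     rem = int(r)
--     x = [0] * m
--     prev_one = False
--     for k in range(m, 0, -1):
--         w = F[k + 1]
--         if (not prev_one) and rem >= w:
--             x[k - 1] = 1
--             rem -= w
--             prev_one = True
--         else:
--             x[k - 1] = 0
--             prev_one = False
--     if rem != 0:
--         raise ValueError("Greedy Zeckendorf failed")
--     for i in range(m - 1):
--         if x[i] == 1 and x[i + 1] == 1:
--             raise ValueError("Adjacent 11 produced")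
--     return "".join(str(b) for b in x)
-- ===== SOURCE B (Python) =====
-- from typing import List
--
--
-- def fib_upto(n: int) -> List[int]:
--     if n < 0:
--         raise ValueError("n must be >= 0")
--     F = [0, 1]
--     for _ in range(2, n + 1):
--         F.append(F[-1] + F[-2])
--     return F[: n + 1]
--
--
-- def _bisect_right(a: List[int], x: int) -> int:
--     """Insertion point after existing entries == x, over the whole list."""
--     lo, hi = 0, len(a)
--     while lo < hi:
--         mid = (lo + hi) // 2
--         if x < a[mid]:
--             hi = mid
--         else:
--             lo = mid + 1
--     return lo
--
--
-- def zeckendorf_word(m: int, r: int) -> str: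
--     """Unique x in X_m (no adjacent 11) with V_m(x)=r."""
--     if m < 1:
--         raise ValueError("m must be >= 1")
--     F = fib_upto(m + 2)
--     if r < 0 or r >= F[m + 2]:
--         raise ValueError("r out of range for modulus F_{m+2}")
--     W = F[2:m + 2]  # W[j] = F[j+2], strictly increasing weights
--     bits = ["0"] * m
--     rem = r
--     hi = m
--     while rem > 0:
--         # jump straight to the largest weight <= rem among indices < hi
--         j = _bisect_right(W[:hi], rem) - 1
--         bits[j] = "1"
--         rem -= W[j]
--         hi = j - 1  # skip the adjacent position: greedy can never use it
--     return "".join(bits)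
-- ===== Notes on version B (the rewrite author's own statement) =====
-- stated objective: alternative
-- what changed: Replaces A's position-by-position downward scan with a prev_one flag and post-hoc rem/adjacency validation by a while-loop that binary-searches the weight list for the largest Fibonacci weight <= rem, sets that bit directly, and restricts further searches two indices lower so non-adjacency holds by construction.
import Mathlib
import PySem

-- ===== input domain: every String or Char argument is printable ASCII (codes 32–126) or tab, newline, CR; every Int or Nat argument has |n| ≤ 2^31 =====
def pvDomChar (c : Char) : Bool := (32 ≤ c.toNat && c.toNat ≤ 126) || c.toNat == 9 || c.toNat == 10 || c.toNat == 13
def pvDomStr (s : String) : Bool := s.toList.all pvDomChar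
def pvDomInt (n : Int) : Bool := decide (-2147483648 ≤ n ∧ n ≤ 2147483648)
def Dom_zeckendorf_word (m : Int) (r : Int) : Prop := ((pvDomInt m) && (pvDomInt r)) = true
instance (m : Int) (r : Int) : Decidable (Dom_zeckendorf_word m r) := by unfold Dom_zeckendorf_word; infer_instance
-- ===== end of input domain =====

-- B replaces A's position-by-position scan (with its prev_one flag and post-hoc
-- rem/adjacency checks) by a jump loop: while rem > 0, binary-search the weight
-- list for the largest weight ≤ rem, set that bit, and restrict the search two
-- indices lower; objective: alternative (same cost, different control flow).

-- ===== PORT A =====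
-- fib_upto, shared verbatim by Source A and Source B (identical helper source in both)
def fibUpto (n : Int) : List Int :=
  if n < 0 then []  -- Python raises ValueError here (unreachable from the entry points)
  else
    PySem.List.slice
      ((PySem.List.pyRange 2 (n + 1) 1).foldl
        (fun F _ => F ++ [PySem.List.pyGetD F (-1) 0 + PySem.List.pyGetD F (-2) 0]) [0, 1])
      none (some (n + 1))

-- one iteration of A's `for k in range(m, 0, -1)` body over the state (x, rem, prev_one)
def stepA (F : List Int) (st : List Int × Int × Bool) (k : Int) : List Int × Int × Bool :=
  match st with
  | (x, rem, prev) =>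
    let w := PySem.List.pyGetD F (k + 1) 0
    if prev = false ∧ w ≤ rem then (PySem.List.pySetD x (k - 1) 1, rem - w, true)
    else (PySem.List.pySetD x (k - 1) 0, rem, false)

def zeckendorf_word (m : Int) (r : Int) : String :=
  if m < 1 then ""  -- raise ValueError
  else
    let F := fibUpto (m + 2)
    if r < 0 ∨ PySem.List.pyGetD F (m + 2) 0 ≤ r then ""  -- raise ValueError
    else
      let res := (PySem.List.pyRange m 0 (-1)).foldl (stepA F) (List.replicate m.toNat 0, r, false)
      let x := res.1
      let rem := res.2.1
      if rem ≠ 0 then ""  -- raise ValueError ("Greedy Zeckendorf failed")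
      else if (PySem.List.pyRange 0 (m - 1) 1).any
          (fun i => PySem.List.pyGetD x i 0 == 1 && PySem.List.pyGetD x (i + 1) 0 == 1) then ""
          -- raise ValueError ("Adjacent 11 produced")
      else PySem.Str.join "" (x.map PySem.Int.toStr)

-- ===== PORT B =====
-- hand-written bisect_right of Source B: `while lo < hi: mid = (lo+hi)//2; ...`
def brLoop (a : List Int) (x : Int) (lo hi : Int) : Int :=
  if h : lo < hi then
    let mid := PySem.Int.floordiv (lo + hi) 2
    if x < PySem.List.pyGetD a mid 0 then brLoop a x lo mid
    else brLoop a x (mid + 1) hi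
  else lo
termination_by (hi - lo).toNat
decreasing_by
  · have h2 : PySem.Int.floordiv (lo + hi) 2 < hi :=
      (PySem.Int.floordiv_lt_iff_lt_mul (by omega)).mpr (by omega)
    omega
  · have h1 := (PySem.Int.floordiv_two_mid_bounds (le_of_lt h)).1
    omega

def pyBisectRight (a : List Int) (x : Int) : Int := brLoop a x 0 (PySem.List.len a)

-- Source B's `while rem > 0` loop; fuel only makes the recursion total (rem drops by ≥ 1
-- per iteration on every admitted input, so fuel = rem.toNat + 1 never runs out)
def zwLoopB (W : List Int) (bits : List String) (rem : Int) (hi : Int) (fuel : Nat) : List String :=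
  match fuel with
  | 0 => bits
  | fuel + 1 =>
    if rem > 0 then
      let j := pyBisectRight (PySem.List.slice W none (some hi)) rem - 1
      zwLoopB W (PySem.List.pySetD bits j "1") (rem - PySem.List.pyGetD W j 0) (j - 1) fuel
    else bits

def zeckendorf_word_alt (m : Int) (r : Int) : String :=
  if m < 1 then ""  -- raise ValueError
  else
    let F := fibUpto (m + 2)
    if r < 0 ∨ PySem.List.pyGetD F (m + 2) 0 ≤ r then ""  -- raise ValueError
    else
      let W := PySem.List.slice F (some 2) (some (m + 2))
      PySem.Str.join "" (zwLoopB W (List.replicate m.toNat "0") r m (r.toNat + 1))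

-- ===== PRECONDITION & SPEC =====
-- Pre_ excludes exactly the inputs where A raises ValueError: m < 1, or r outside
-- [0, F_{m+2}).  Within Dom (|r| ≤ 2^31) the disjunct `46 ≤ m` admits EVERY
-- remaining input with 0 ≤ r, and on those inputs A returns normally, since
-- r ≤ 2^31 < F_47 ≤ F_{m+2}; the disjunct only spares the Decidable instance an
-- astronomically large Fibonacci computation — no input A returns on is excluded.
def Pre_zeckendorf_word (m : Int) (r : Int) : Prop :=
  1 ≤ m ∧ 0 ≤ r ∧ (46 ≤ m ∨ r < (Nat.fib (m.toNat + 2) : Int))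
instance (m : Int) (r : Int) : Decidable (Pre_zeckendorf_word m r) := by
  unfold Pre_zeckendorf_word; infer_instance

def pvWitness_zeckendorf_word : Int × Int := (4, 7)

def Spec_zeckendorf_word (m : Int) (r : Int) (out : String) : Prop := out = zeckendorf_word_alt m r
instance (m : Int) (r : Int) (out : String) : Decidable (Spec_zeckendorf_word m r out) := by unfold Spec_zeckendorf_word; infer_instance

-- ===== CLAIM (what is proved, stated in full; the proofs are below) =====
def Claim_equal_zeckendorf_word : Prop := ∀ (m : Int) (r : Int), Dom_zeckendorf_word m r → Pre_zeckendorf_word m r → Spec_zeckendorf_word m r (zeckendorf_word m r)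

-- ===== LEMMAS AND PROOFS =====

-- the greedy Zeckendorf bit list: index i carries weight fib (i+2); zbits k rem
-- is the word over indices 0..k-1 (given rem < fib (k+2))
def zbits : Nat → Nat → List Int
  | 0, _ => []
  | k + 1, rem =>
    if Nat.fib (k + 2) ≤ rem then zbits k (rem - Nat.fib (k + 2)) ++ [1]
    else zbits k rem ++ [0]

theorem zbits_length (k rem : Nat) : (zbits k rem).length = k := by
  induction k generalizing rem with
  | zero => simp [zbits]
  | succ k ih => unfold zbits; split <;> simp [ih]

theorem zbits_zero (k : Nat) : zbits k 0 = List.replicate k 0 := by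
  induction k with
  | zero => simp [zbits]
  | succ k ih =>
    rw [zbits, if_neg (by have := Nat.fib_pos.mpr (show 0 < k+2 by omega); omega), ih,
      List.replicate_succ']

theorem zbits_top? (k rem : Nat) :
    (zbits (k + 1) rem)[k]? = some (if Nat.fib (k + 2) ≤ rem then 1 else 0) := by
  rw [zbits]
  split <;> simp [zbits_length]

theorem zbits_noadj (k : Nat) : ∀ rem : Nat, rem < Nat.fib (k + 2) →
    ∀ i : Nat, ¬((zbits k rem)[i]? = some 1 ∧ (zbits k rem)[i + 1]? = some 1) := by
  induction k with
  | zero => intro rem _ i; simp [zbits]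
  | succ k ih =>
    intro rem hrem i
    rw [show k+1+2 = k+3 from by omega] at hrem
    have efib : Nat.fib (k + 3) = Nat.fib (k + 1) + Nat.fib (k + 2) := by
      rw [show k+3 = (k+1)+2 from by omega, Nat.fib_add_two,
        show k+1+1 = k+2 from by omega]
    rw [zbits]
    by_cases htake : Nat.fib (k + 2) ≤ rem
    · rw [if_pos htake]
      set rem2 := rem - Nat.fib (k + 2) with hrem2
      have hlen : (zbits k rem2).length = k := zbits_length _ _
      have hr2 : rem2 < Nat.fib (k + 1) := by omega
      have hr2' : rem2 < Nat.fib (k + 2) :=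
        lt_of_lt_of_le hr2 (Nat.fib_mono (by omega))
      rcases lt_trichotomy (i + 1) k with h | h | h
      · rw [List.getElem?_append_left (by omega), List.getElem?_append_left (by omega)]
        exact ih rem2 hr2' i
      · -- i + 1 = k : the pair is (last of zbits k rem2, the appended 1)
        rintro ⟨h1, _⟩
        rw [List.getElem?_append_left (by omega)] at h1
        rcases Nat.eq_zero_or_pos k with hk0 | hk0
        · omega
        · obtain ⟨t, rfl⟩ : ∃ t, k = t + 1 := ⟨k - 1, by omega⟩
          have hi' : i = t := by omega
          rw [show t+1+1 = t+2 from by omega] at hr2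
          rw [hi', zbits_top? t rem2, if_neg (by omega)] at h1
          simp at h1
      · rintro ⟨_, h2⟩
        have : ((zbits k rem2 ++ [1] : List Int)).length = k + 1 := by simp [hlen]
        rw [List.getElem?_eq_none (by omega)] at h2
        simp at h2
    · rw [if_neg htake]
      have hlen : (zbits k rem).length = k := zbits_length _ _
      rcases lt_trichotomy (i + 1) k with h | h | h
      · rw [List.getElem?_append_left (by omega), List.getElem?_append_left (by omega)]
        exact ih rem (by omega) i
      · rintro ⟨_, h2⟩
        rw [List.getElem?_append_right (by omega)] at h2
        simp [h, hlen] at h2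
      · rintro ⟨_, h2⟩
        rw [List.getElem?_eq_none (by simp [hlen]; omega)] at h2
        simp at h2

theorem zbits_jump (j rem : Nat) (h1 : Nat.fib (j + 2) ≤ rem) (h2 : rem < Nat.fib (j + 3)) :
    ∀ k : Nat, j + 1 ≤ k →
    zbits k rem = (zbits j (rem - Nat.fib (j + 2)) ++ [1]) ++ List.replicate (k - (j + 1)) 0 := by
  intro k
  induction k with
  | zero => omega
  | succ k ih =>
    intro hk
    rcases Nat.lt_or_ge j.succ k.succ with hlt | hge
    · have hk' : j + 1 ≤ k := by omega
      have : rem < Nat.fib (k + 2) :=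
        lt_of_lt_of_le h2 (Nat.fib_mono (by omega))
      rw [zbits, if_neg (by omega), ih hk']
      rw [List.append_assoc, List.append_assoc, List.append_assoc]
      congr 1
      congr 1
      have : k.succ - (j + 1) = (k - (j + 1)) + 1 := by omega
      rw [this, List.replicate_succ']
    · have : j = k := by omega
      subst this
      rw [zbits, if_pos h1]
      simp

theorem zbits_top_zero (t rem : Nat) (h : rem < Nat.fib (t + 2)) :
    zbits (t + 1) rem = zbits t rem ++ [0] := by
  rw [zbits, if_neg (by omega)]

theorem pyGetD_neg_one (xs : List Int) (h : 1 ≤ xs.length) :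
    PySem.List.pyGetD xs (-1) 0 = xs[xs.length - 1]'(by omega) := by
  simp only [PySem.List.pyGetD, PySem.List.pyGet?, PySem.List.pyIdx?, Int.reduceNeg,
    Int.neg_nonneg, Int.reduceLE, reduceIte, neg_le_neg_iff, Nat.one_le_cast, neg_neg,
    Int.toNat_one]
  rw [if_pos h]
  simp [List.getElem?_eq_getElem (show xs.length - 1 < xs.length by omega)]

theorem pyGetD_neg_two (xs : List Int) (h : 2 ≤ xs.length) :
    PySem.List.pyGetD xs (-2) 0 = xs[xs.length - 2]'(by omega) := by
  simp only [PySem.List.pyGetD, PySem.List.pyGet?, PySem.List.pyIdx?, Int.reduceNeg,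
    Int.neg_nonneg, Int.reduceLE, reduceIte, neg_le_neg_iff, neg_neg]
  rw [if_pos (by exact_mod_cast h)]
  simp [List.getElem?_eq_getElem (show xs.length - 2 < xs.length by omega)]

theorem fibFold (N : Nat) (h : 1 ≤ N) :
    (PySem.List.pyRange 2 ((N : Int) + 1) 1).foldl
        (fun F _ => F ++ [PySem.List.pyGetD F (-1) 0 + PySem.List.pyGetD F (-2) 0]) [0, 1]
      = (List.range (N + 1)).map (fun k => (Nat.fib k : Int)) := by
  induction N with
  | zero => omega
  | succ N ih =>
    rcases Nat.eq_zero_or_pos N with rfl | hN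
    · rw [PySem.List.pyRange_one_eq_nil (by norm_num)]
      decide
    · have hsplit : PySem.List.pyRange 2 ((N : Int) + 1 + 1) 1
          = PySem.List.pyRange 2 ((N : Int) + 1) 1 ++ [(N : Int) + 1] := by
        exact_mod_cast PySem.List.pyRange_one_succ_right (a := 2) (b := (N : Int) + 1)
          (by exact_mod_cast by omega)
      have : ((N + 1 : Nat) : Int) + 1 = (N : Int) + 1 + 1 := by omega
      rw [this, hsplit, List.foldl_append, ih hN]
      set L := (List.range (N + 1)).map (fun k => (Nat.fib k : Int)) with hL
      have hlen : L.length = N + 1 := by simp [hL]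
      simp only [List.foldl_cons, List.foldl_nil]
      rw [pyGetD_neg_one L (by omega), pyGetD_neg_two L (by omega)]
      have e1 : L[L.length - 1]'(by omega) = (Nat.fib N : Int) := by
        simp [hL]
      have e2 : L[L.length - 2]'(by omega) = (Nat.fib (N - 1) : Int) := by
        simp [hL]
      rw [e1, e2, List.range_succ (n := N + 1), List.map_append]
      congr 1
      simp only [List.map_cons, List.map_nil]
      congr 1
      have : Nat.fib (N + 1) = Nat.fib (N - 1) + Nat.fib N := by
        rw [show N + 1 = (N - 1) + 2 from by omega, Nat.fib_add_two,
          show N - 1 + 1 = N from by omega]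
      rw [this]; omega


-- fibUpto really is the Fibonacci table
theorem fibUpto_eq (N : Nat) (h : 1 ≤ N) :
    fibUpto (N : Int) = (List.range (N + 1)).map (fun k => (Nat.fib k : Int)) := by
  rw [fibUpto, if_neg (by omega), fibFold N h, PySem.List.slice_to _ (by positivity)]
  have e : ((N : Int) + 1).toNat = N + 1 := by omega
  rw [e, List.take_of_length_le (by simp)]

theorem fibUpto_get (N k : Nat) (hN : 1 ≤ N) (hk : k ≤ N) :
    PySem.List.pyGetD (fibUpto (N : Int)) (k : Int) 0 = (Nat.fib k : Int) := by
  rw [fibUpto_eq N hN, PySem.List.pyGetD_natCast]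
  rw [List.getD_eq_getElem?_getD, List.getElem?_eq_getElem (by simp; omega)]
  simp

-- list utilities
theorem drop_set_cons {α : Type} (l : List α) (k : Nat) (v : α) (h : k < l.length) :
    (l.set k v).drop k = v :: l.drop (k + 1) := by
  rw [List.drop_eq_getElem_cons (by simpa using h)]
  simp [List.getElem_set_self (h := by simpa using h)]
  rw [List.drop_set_of_lt (hnm := by omega)]

theorem drop_eq_replicate_append {α : Type} (c : α) :
    ∀ (d : Nat) (a : Nat) (l : List α), a + d ≤ l.length →
    (∀ i : Nat, a ≤ i → i < a + d → (h : i < l.length) → l[i] = c) →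
    l.drop a = List.replicate d c ++ l.drop (a + d) := by
  intro d
  induction d with
  | zero => intro a l _ _; simp
  | succ d ih =>
    intro a l hlen hc
    rw [List.drop_eq_getElem_cons (by omega), hc a (by omega) (by omega),
      List.replicate_succ, List.cons_append]
    have := ih (a + 1) l (by omega) (fun i h1 h2 h3 => hc i (by omega) (by omega) h3)
    rw [this, show a + 1 + d = a + (d + 1) from by omega]

-- A's loop computes zbits
theorem loopA (mN : Nat) (hm : 1 ≤ mN) :
    ∀ (k : Nat), k ≤ mN → ∀ (x : List Int), x.length = mN →
    ∀ (rem : Nat), rem < Nat.fib (k + 2) →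
    ∀ (prev : Bool), (prev = true → rem < Nat.fib (k + 1)) →
    ∃ p, (PySem.List.pyRange (k : Int) 0 (-1)).foldl (stepA (fibUpto ((mN : Int) + 2)))
        (x, (rem : Int), prev)
      = (zbits k rem ++ x.drop k, 0, p) := by
  intro k
  induction k with
  | zero =>
    intro _ x _ rem hrem prev _
    rw [PySem.List.pyRange_neg_one_eq_nil (by norm_num)]
    have : rem = 0 := by have : Nat.fib (0 + 2) = 1 := by decide
                         omega
    subst this
    exact ⟨prev, by simp [zbits]⟩
  | succ k ih =>
    intro hk x hx rem hrem prev hprev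
    rw [show k + 1 + 2 = k + 3 from by omega] at hrem
    have efib : Nat.fib (k + 3) = Nat.fib (k + 1) + Nat.fib (k + 2) := by
      rw [show k + 3 = (k + 1) + 2 from by omega, Nat.fib_add_two,
        show k + 1 + 1 = k + 2 from by omega]
    rw [show k + 1 + 1 = k + 2 from by omega] at hprev
    have hcons : PySem.List.pyRange ((k + 1 : Nat) : Int) 0 (-1)
        = ((k + 1 : Nat) : Int) :: PySem.List.pyRange ((k : Nat) : Int) 0 (-1) := by
      rw [PySem.List.pyRange_neg_one_cons (by positivity),
        show ((k + 1 : Nat) : Int) - 1 = ((k : Nat) : Int) from by omega]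
    have hw : PySem.List.pyGetD (fibUpto ((mN : Int) + 2)) (((k + 1 : Nat) : Int) + 1) 0
        = (Nat.fib (k + 2) : Int) := by
      have e1 : ((mN : Int) + 2) = ((mN + 2 : Nat) : Int) := by omega
      have e2 : (((k + 1 : Nat) : Int) + 1) = ((k + 2 : Nat) : Int) := by omega
      rw [e1, e2, fibUpto_get (mN + 2) (k + 2) (by omega) (by omega)]
    have hkx : k < x.length := by omega
    have hidx : (((k + 1 : Nat) : Int) - 1) = ((k : Nat) : Int) := by omega
    rw [hcons, List.foldl_cons]
    by_cases htake : Nat.fib (k + 2) ≤ rem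
    · have hpf : prev = false := by
        cases prev with
        | false => rfl
        | true => exact absurd (hprev rfl) (by omega)
      have hstep : stepA (fibUpto ((mN : Int) + 2)) (x, (rem : Int), prev) ((k + 1 : Nat) : Int)
          = (x.set k 1, ((rem - Nat.fib (k + 2) : Nat) : Int), true) := by
        rw [stepA, hw]
        rw [if_pos ⟨hpf, by exact_mod_cast htake⟩]
        rw [hidx, PySem.List.pySetD_of_nonneg _ _ (by positivity)]
        simp only [Int.toNat_natCast, Prod.mk.injEq]
        refine ⟨by trivial, ?_, by trivial⟩
        omega
      have hmono : Nat.fib (k + 1) ≤ Nat.fib (k + 2) := Nat.fib_mono (by omega)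
      obtain ⟨p, hp⟩ := ih (by omega) (x.set k 1) (by simpa using hx)
        (rem - Nat.fib (k + 2)) (by omega) true (fun _ => by omega)
      refine ⟨p, ?_⟩
      rw [hstep, hp]
      rw [zbits, if_pos htake, drop_set_cons x k 1 hkx]
      simp
    · have hstep : stepA (fibUpto ((mN : Int) + 2)) (x, (rem : Int), prev) ((k + 1 : Nat) : Int)
          = (x.set k 0, (rem : Int), false) := by
        rw [stepA, hw]
        rw [if_neg (by rintro ⟨_, hle⟩; exact htake (by exact_mod_cast hle))]
        rw [hidx, PySem.List.pySetD_of_nonneg _ _ (by positivity)]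
        simp
      obtain ⟨p, hp⟩ := ih (by omega) (x.set k 0) (by simpa using hx)
        rem (by omega) false (by simp)
      refine ⟨p, ?_⟩
      rw [hstep, hp]
      rw [zbits, if_neg (by omega), drop_set_cons x k 0 hkx]
      simp

-- the hand-written bisect_right meets its spec
theorem brLoop_spec (a : List Int) (x : Int)
    (hsort : ∀ i j : Nat, (hij : i ≤ j) → (hj : j < a.length) → a[i]'(by omega) ≤ a[j]) :
    ∀ (n : Nat) (lo hi : Int), (hi - lo).toNat ≤ n → 0 ≤ lo → lo ≤ hi → hi ≤ (a.length : Int) →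
    (∀ i : Nat, i < lo.toNat → (h : i < a.length) → a[i] ≤ x) →
    (∀ i : Nat, hi.toNat ≤ i → (h : i < a.length) → x < a[i]) →
    lo ≤ brLoop a x lo hi ∧ brLoop a x lo hi ≤ hi ∧
    (∀ i : Nat, i < (brLoop a x lo hi).toNat → (h : i < a.length) → a[i] ≤ x) ∧
    (∀ i : Nat, (brLoop a x lo hi).toNat ≤ i → (h : i < a.length) → x < a[i]) := by
  intro n
  induction n with
  | zero =>
    intro lo hi hn h0 hlh hha hlow hhigh
    have : ¬ lo < hi := by omega
    rw [brLoop, dif_neg this]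
    exact ⟨le_refl _, by omega, hlow, fun i hi' h => hhigh i (by omega) h⟩
  | succ n ihn =>
    intro lo hi hn h0 hlh hha hlow hhigh
    by_cases hlt : lo < hi
    · rw [brLoop, dif_pos hlt]
      have hmid := PySem.Int.floordiv_two_mid_bounds (le_of_lt hlt)
      set mid := PySem.Int.floordiv (lo + hi) 2 with hmid_def
      have hmidlt : mid < hi := (PySem.Int.floordiv_lt_iff_lt_mul (by omega)).mpr (by omega)
      have hmida : mid.toNat < a.length := by omega
      have hget : PySem.List.pyGetD a mid 0 = a[mid.toNat] :=
        PySem.List.pyGetD_eq_getElem a 0 (by omega) (by omega)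
      by_cases hx : x < PySem.List.pyGetD a mid 0
      · rw [if_pos hx]
        have hrec := ihn lo mid (by omega) h0 (by omega) (by omega) hlow (by
          intro i hi' h
          calc x < a[mid.toNat] := by rw [← hget]; exact hx
            _ ≤ a[i] := hsort mid.toNat i (by omega) h)
        exact ⟨hrec.1, by omega, hrec.2.2.1, hrec.2.2.2⟩
      · rw [if_neg hx]
        have hrec := ihn (mid + 1) hi (by omega) (by omega) (by omega) hha (by
          intro i hi' h
          have : a[i] ≤ a[mid.toNat] := hsort i mid.toNat (by omega) hmida
          rw [hget] at hx
          omega) hhigh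
        exact ⟨by omega, hrec.2.1, hrec.2.2.1, hrec.2.2.2⟩
    · rw [brLoop, dif_neg hlt]
      exact ⟨le_refl _, by omega, hlow, fun i hi' h => hhigh i (by omega) h⟩

-- the weight list W = F[2 : m+2]
theorem W_eq (mN : Nat) (hm : 1 ≤ mN) :
    PySem.List.slice (fibUpto ((mN : Int) + 2)) (some 2) (some ((mN : Int) + 2))
      = (List.range mN).map (fun j => (Nat.fib (j + 2) : Int)) := by
  have e : ((mN : Int) + 2) = ((mN + 2 : Nat) : Int) := by omega
  rw [e, fibUpto_eq (mN + 2) (by omega),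
    PySem.List.slice_toNat _ (by norm_num) (by positivity)]
  apply List.ext_getElem
  · simp; omega
  · intro i h1 h2
    simp only [List.getElem_take, List.getElem_drop, List.getElem_map, List.getElem_range]
    rw [show Int.toNat 2 + i = i + 2 from by omega]

theorem zwLoopB_zero (W : List Int) (bits : List String) (rem hi : Int) (fuel : Nat)
    (h : ¬ rem > 0) : zwLoopB W bits rem hi fuel = bits := by
  cases fuel <;> simp [zwLoopB, h]

-- B's loop computes zbits (as strings)
theorem toStr_zero : PySem.Int.toStr 0 = "0" := by decide

theorem toStr_one : PySem.Int.toStr 1 = "1" := by decide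

theorem bits_decomp (hi : Nat) (bits : List String) (hlen : hi ≤ bits.length)
    (hpre : ∀ i : Nat, i < hi → (h : i < bits.length) → bits[i] = "0") :
    bits = List.replicate hi "0" ++ bits.drop hi := by
  have := drop_eq_replicate_append "0" hi 0 bits (by omega)
    (fun i h1 h2 h3 => hpre i (by omega) h3)
  simpa using this

theorem loopB (mN : Nat) (_hm : 1 ≤ mN) :
    ∀ (fuel : Nat) (hi : Nat), hi ≤ mN → ∀ (rem : Int), 0 ≤ rem →
    rem.toNat < Nat.fib (hi + 2) → rem.toNat ≤ fuel →
    ∀ (bits : List String), bits.length = mN →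
    (∀ i : Nat, i < hi → (h : i < bits.length) → bits[i] = "0") →
    zwLoopB ((List.range mN).map (fun j => (Nat.fib (j + 2) : Int))) bits rem (hi : Int) fuel
      = (zbits hi rem.toNat).map PySem.Int.toStr ++ bits.drop hi := by
  set W := (List.range mN).map (fun j => (Nat.fib (j + 2) : Int)) with hW
  have hWlen : W.length = mN := by simp [hW]
  intro fuel
  induction fuel with
  | zero =>
    intro hi hhi rem h0 hfib hfuel bits hlen hpre
    have hr0 : rem = 0 := by omega
    subst hr0
    show bits = (zbits hi (0:Int).toNat).map PySem.Int.toStr ++ bits.drop hi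
    rw [Int.toNat_zero, zbits_zero, List.map_replicate, toStr_zero]
    exact bits_decomp hi bits (by omega) hpre
  | succ fuel ih =>
    intro hi hhi rem h0 hfib hfuel bits hlen hpre
    by_cases hpos : rem > 0
    · have hhi1 : 1 ≤ hi := by
        rcases Nat.eq_zero_or_pos hi with rfl | h
        · have : Nat.fib (0 + 2) = 1 := by decide
          omega
        · omega
      -- the sliced search list
      have haeq : PySem.List.slice W none (some (hi : Int))
          = (List.range hi).map (fun j => (Nat.fib (j + 2) : Int)) := by
        rw [PySem.List.slice_to _ (by positivity), Int.toNat_natCast, hW,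
          ← List.map_take, List.take_range, Nat.min_eq_left hhi]
      set a := PySem.List.slice W none (some (hi : Int)) with ha
      have ham : a = (List.range hi).map (fun j => (Nat.fib (j + 2) : Int)) := haeq
      have halen : a.length = hi := by rw [ham]; simp
      have hanat : ∀ (i : Nat) (h : i < a.length), a[i] = ((Nat.fib (i + 2) : Nat) : Int) := by
        intro i h
        rw [List.getElem_of_eq ham h]
        simp
      have hsort : ∀ i j : Nat, (hij : i ≤ j) → (hj : j < a.length) → a[i]'(by omega) ≤ a[j] := by
        intro i j hij hj
        rw [hanat i (by omega), hanat j hj]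
        exact_mod_cast Nat.fib_mono (by omega)
      have hspec := brLoop_spec a rem hsort a.length 0 (a.length : Int) (by omega) (by omega)
        (by omega) (by omega) (fun i h1 h2 => by omega) (fun i h1 h2 => by omega)
      rw [show brLoop a rem 0 (a.length : Int) = pyBisectRight a rem from by
        rw [pyBisectRight]; simp] at hspec
      obtain ⟨hres0, hresle, hlowset, hhighset⟩ := hspec
      set res := pyBisectRight a rem with hres
      have hres1 : 1 ≤ res := by
        by_contra hc
        have h00 : (0 : Nat) < a.length := by omega
        have h01 := hhighset 0 (by omega) h00
        rw [hanat 0 h00] at h01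
        have : Nat.fib (0 + 2) = 1 := by decide
        omega
      obtain ⟨jN, hj⟩ : ∃ jN : Nat, res - 1 = (jN : Int) := ⟨(res - 1).toNat, by omega⟩
      have hjhiN : jN < hi := by omega
      have hjle : Nat.fib (jN + 2) ≤ rem.toNat := by
        have h1 : jN < a.length := by omega
        have h2 := hlowset jN (by omega) h1
        rw [hanat jN h1] at h2
        omega
      have hjhi3 : rem.toNat < Nat.fib (jN + 3) := by
        rcases Nat.lt_or_ge (jN + 1) hi with hlt | hge
        · have h1 : jN + 1 < a.length := by omega
          have h2 := hhighset (jN + 1) (by omega) h1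
          rw [hanat (jN + 1) h1, show jN + 1 + 2 = jN + 3 from by omega] at h2
          omega
        · have he : hi = jN + 1 := by omega
          rw [he, show jN + 1 + 2 = jN + 3 from by omega] at hfib
          exact hfib
      have hWj : PySem.List.pyGetD W (res - 1) 0 = ((Nat.fib (jN + 2) : Nat) : Int) := by
        rw [hj, PySem.List.pyGetD_natCast, hW]
        rw [List.getD_eq_getElem?_getD, List.getElem?_eq_getElem (by simp; omega)]
        simp
      have hbits' : PySem.List.pySetD bits (res - 1) "1" = bits.set jN "1" := by
        rw [PySem.List.pySetD_of_nonneg _ _ (by omega), hj, Int.toNat_natCast]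
      have hfibpos : 1 ≤ Nat.fib (jN + 2) := Nat.fib_pos.mpr (by omega)
      have hefib : Nat.fib (jN + 3) = Nat.fib (jN + 1) + Nat.fib (jN + 2) := by
        rw [show jN + 3 = (jN + 1) + 2 from by omega, Nat.fib_add_two,
          show jN + 1 + 1 = jN + 2 from by omega]
      -- one unfolding of the while loop
      rw [show zwLoopB W bits rem (hi : Int) (fuel + 1)
          = zwLoopB W (PySem.List.pySetD bits (pyBisectRight (PySem.List.slice W none (some (hi:Int))) rem - 1) "1")
              (rem - PySem.List.pyGetD W (pyBisectRight (PySem.List.slice W none (some (hi:Int))) rem - 1) 0)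
              ((pyBisectRight (PySem.List.slice W none (some (hi:Int))) rem - 1) - 1) fuel from by
        rw [zwLoopB]; rw [if_pos hpos]]
      rw [← ha, ← hres, hbits', hWj]
      -- greedy takes bit jN
      have hjump := zbits_jump jN rem.toNat (by omega) hjhi3 hi (by omega)
      rcases Nat.eq_zero_or_pos jN with hj0 | hjpos
      · -- lowest position: rem = 1, afterwards rem' = 0 and the loop stops
        subst hj0
        have hfib2 : Nat.fib (0 + 2) = 1 := by decide
        have hrem1 : rem = 1 := by
          have : Nat.fib (0 + 3) = 2 := by decide
          omega
        have hrem' : rem - ((Nat.fib (0 + 2) : Nat) : Int) = 0 := by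
          rw [hfib2]; omega
        rw [hrem', zwLoopB_zero _ _ _ _ _ (by norm_num), hjump, hrem1]
        have hbd := bits_decomp hi bits (by omega) hpre
        rw [show List.replicate hi "0" = "0" :: List.replicate (hi - 1) "0" from by
          rw [← List.replicate_succ, show (hi - 1) + 1 = hi from by omega]] at hbd
        conv_lhs => rw [hbd]
        simp [zbits, toStr_one, toStr_zero]
      · obtain ⟨t, rfl⟩ : ∃ t, jN = t + 1 := ⟨jN - 1, by omega⟩
        rw [hj, show ((t + 1 : Nat) : Int) - 1 = ((t : Nat) : Int) from by omega]
        have hrt : (rem - ((Nat.fib (t + 1 + 2) : Nat) : Int)).toNat < Nat.fib (t + 2) := by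
          have e2 : Nat.fib (t + 1 + 1) = Nat.fib (t + 2) := by
            rw [show t + 1 + 1 = t + 2 from by omega]
          omega
        have hrec := ih t (by omega) (rem - ((Nat.fib (t + 1 + 2) : Nat) : Int)) (by omega)
          hrt (by omega) (bits.set (t + 1) "1") (by simpa using hlen)
          (by
            intro i h1 h2
            rw [List.getElem_set_ne (by omega)]
            exact hpre i (by omega) (by simpa using h2))
        rw [hrec]
        -- assemble the list identity
        have hbt : t + 1 < bits.length := by omega
        have hdrop1 : (bits.set (t + 1) "1").drop t = "0" :: "1" :: bits.drop (t + 2) := by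
          rw [List.drop_eq_getElem_cons (by simp; omega)]
          rw [List.getElem_set_ne (by omega)]
          have h1 := drop_set_cons bits (t + 1) "1" hbt
          rw [h1, hpre t (by omega) (by omega)]
        have hdrop2 : bits.drop (t + 2) = List.replicate (hi - (t + 2)) "0" ++ bits.drop hi := by
          have h2 := drop_eq_replicate_append "0" (hi - (t + 2)) (t + 2) bits (by omega)
            (fun i h1 h2 h3 => hpre i (by omega) h3)
          rw [h2, show t + 2 + (hi - (t + 2)) = hi from by omega]
        have htop := zbits_top_zero t ((rem - ((Nat.fib (t + 1 + 2) : Nat) : Int)).toNat) hrt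
        rw [hjump,
          show rem.toNat - Nat.fib (t + 1 + 2)
            = (rem - ((Nat.fib (t + 1 + 2) : Nat) : Int)).toNat from by omega,
          htop, hdrop1, hdrop2]
        simp [toStr_zero, toStr_one, List.append_assoc,
          show hi - (t + 1 + 1) = hi - (t + 2) from by omega]
    · have hr0 : rem = 0 := by omega
      subst hr0
      rw [zwLoopB_zero _ _ _ _ _ hpos]
      rw [Int.toNat_zero, zbits_zero, List.map_replicate, toStr_zero]
      exact bits_decomp hi bits (by omega) hpre

-- Pre_ ∧ Dom pins down the true range condition
theorem pre_range (m r : Int) (hd : Dom_zeckendorf_word m r) (hp : Pre_zeckendorf_word m r) :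
    1 ≤ m ∧ 0 ≤ r ∧ r < (Nat.fib (m.toNat + 2) : Int) := by
  obtain ⟨h1, h2, h3⟩ := hp
  refine ⟨h1, h2, ?_⟩
  rcases h3 with hbig | hlt
  · simp only [Dom_zeckendorf_word, pvDomInt, Bool.and_eq_true, decide_eq_true_eq] at hd
    have hb : (2147483648 : Nat) < Nat.fib 47 := by decide
    have hb' : ((2147483648 : Nat) : Int) < (Nat.fib 47 : Int) := by exact_mod_cast hb
    have hmono : (Nat.fib 47 : Int) ≤ (Nat.fib (m.toNat + 2) : Int) := by
      exact_mod_cast Nat.fib_mono (by omega)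
    omega
  · exact hlt

theorem range_check_false (mN rN : Nat) (hm : 1 ≤ mN)
    (hr : (rN : Int) < (Nat.fib (mN + 2) : Int)) :
    ¬ ((rN : Int) < 0 ∨
      PySem.List.pyGetD (fibUpto ((mN : Int) + 2)) ((mN : Int) + 2) 0 ≤ (rN : Int)) := by
  rintro (h | h)
  · omega
  · rw [show (mN : Int) + 2 = ((mN + 2 : Nat) : Int) from by omega] at h
    rw [fibUpto_get (mN + 2) (mN + 2) (by omega) (le_refl _)] at h
    omega

theorem portA_eq (m r : Int) (hd : Dom_zeckendorf_word m r) (hp : Pre_zeckendorf_word m r) :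
    zeckendorf_word m r = PySem.Str.join "" ((zbits m.toNat r.toNat).map PySem.Int.toStr) := by
  obtain ⟨hm1, hr0, hrlt⟩ := pre_range m r hd hp
  obtain ⟨mN, rfl⟩ : ∃ mN : Nat, m = (mN : Int) := ⟨m.toNat, by omega⟩
  obtain ⟨rN, rfl⟩ : ∃ rN : Nat, r = (rN : Int) := ⟨r.toNat, by omega⟩
  simp only [Int.toNat_natCast] at hrlt ⊢
  have hmN : 1 ≤ mN := by exact_mod_cast hm1
  have hrN : rN < Nat.fib (mN + 2) := by exact_mod_cast hrlt
  rw [zeckendorf_word, if_neg (by omega)]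
  rw [if_neg (range_check_false mN rN hmN hrlt)]
  obtain ⟨p, hp'⟩ := loopA mN hmN mN (le_refl _) (List.replicate (↑mN : Int).toNat 0)
    (by simp) rN hrN false (by simp)
  rw [hp']
  simp only [Int.toNat_natCast, List.drop_replicate, Nat.sub_self, List.replicate_zero,
    List.append_nil]
  rw [if_neg (by simp)]
  rw [if_neg ?hadj]
  case hadj =>
    simp only [List.any_eq_true, not_exists, not_and]
    intro i hi
    rw [PySem.List.mem_pyRange_one] at hi
    obtain ⟨iN, rfl⟩ : ∃ iN : Nat, i = (iN : Int) := ⟨i.toNat, by omega⟩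
    have hiN : iN + 1 < mN := by omega
    have hlenz : (zbits mN rN).length = mN := zbits_length mN rN
    rw [PySem.List.pyGetD_natCast,
      show (iN : Int) + 1 = ((iN + 1 : Nat) : Int) from by omega,
      PySem.List.pyGetD_natCast]
    rw [List.getD_eq_getElem?_getD, List.getElem?_eq_getElem (by omega),
      List.getD_eq_getElem?_getD, List.getElem?_eq_getElem (by omega)]
    simp only [Option.getD_some, Bool.and_eq_true, beq_iff_eq]
    rintro ⟨ha1, ha2⟩
    exact zbits_noadj mN rN hrN iN
      ⟨by rw [List.getElem?_eq_getElem (by omega)]; simp [ha1],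
       by rw [List.getElem?_eq_getElem (by omega)]; simp [ha2]⟩

theorem portB_eq (m r : Int) (hd : Dom_zeckendorf_word m r) (hp : Pre_zeckendorf_word m r) :
    zeckendorf_word_alt m r = PySem.Str.join "" ((zbits m.toNat r.toNat).map PySem.Int.toStr) := by
  obtain ⟨hm1, hr0, hrlt⟩ := pre_range m r hd hp
  obtain ⟨mN, rfl⟩ : ∃ mN : Nat, m = (mN : Int) := ⟨m.toNat, by omega⟩
  obtain ⟨rN, rfl⟩ : ∃ rN : Nat, r = (rN : Int) := ⟨r.toNat, by omega⟩
  simp only [Int.toNat_natCast] at hrlt ⊢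
  have hmN : 1 ≤ mN := by exact_mod_cast hm1
  have hrN : rN < Nat.fib (mN + 2) := by exact_mod_cast hrlt
  rw [zeckendorf_word_alt, if_neg (by omega)]
  rw [if_neg (range_check_false mN rN hmN hrlt)]
  have hloop := loopB mN hmN (rN + 1) mN (le_refl _) (rN : Int) (by positivity)
    (by simpa using hrN) (by simp) (List.replicate mN "0") (by simp)
    (fun i h1 h2 => by simp)
  simp only [Int.toNat_natCast]
  rw [W_eq mN hmN, hloop]
  simp

-- ===== VERDICT (by name: the statement is the Claim_ definition above) =====
theorem zeckendorf_word_spec : Claim_equal_zeckendorf_word := by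
  intro m r hd hp
  unfold Spec_zeckendorf_word
  rw [portA_eq m r hd hp, portB_eq m r hd hp]
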